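-- pv_equiv track=rewrite | github.com/songzy12/AuthorIdentification | XGB.py | preprocessFastText
-- ===== SOURCE A (Python) =====
-- def preprocessFastText(text):
--     text = text.replace("' ", " ' ")
--     signs = set(',.:;"?!')
--     prods = set(text) & signs
--     if not prods:
--         return text
--
--     for sign in prods:
--         text = text.replace(sign, ' {} '.format(sign) )
--     return text
-- ===== SOURCE B (Python) =====
-- def preprocessFastText(text):
--     signs = ',.:;"?!'
--     out = []
--     i = 0
--     n = len(text)
--     while i < n:
--         ch = text[i]
--         if ch == "'" and i + 1 < n and text[i + 1] == ' ':
--             out.append(" ' ")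
--             i += 2
--         elif ch in signs:
--             out.append(' ' + ch + ' ')
--             i += 1
--         else:
--             out.append(ch)
--             i += 1
--     return ''.join(out)
-- ===== Notes on version B (the rewrite author's own statement) =====
-- stated objective: alternative
-- what changed: Replaces A's staged string passes (a replace of quote-space plus one full replace() pass per punctuation sign present, after a set intersection) with a single recursive left-to-right scan that rewrites the quote-space pair and pads each sign in one traversal.
import Mathlib
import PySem

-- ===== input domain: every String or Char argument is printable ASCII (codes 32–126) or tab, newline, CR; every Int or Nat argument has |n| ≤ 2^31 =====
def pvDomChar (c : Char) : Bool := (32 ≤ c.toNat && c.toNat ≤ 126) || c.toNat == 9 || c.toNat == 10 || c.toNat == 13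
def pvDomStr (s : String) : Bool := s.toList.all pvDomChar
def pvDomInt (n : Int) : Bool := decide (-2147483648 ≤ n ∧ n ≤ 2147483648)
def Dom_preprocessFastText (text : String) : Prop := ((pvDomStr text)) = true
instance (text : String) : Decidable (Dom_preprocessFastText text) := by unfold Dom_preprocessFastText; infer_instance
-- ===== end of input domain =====

-- B replaces A's staged passes (replace "' ", then one replace() pass per punctuation sign
-- present) with ONE recursive left-to-right scan that handles the quote-space pair and pads
-- signs as it goes; same return value everywhere (objective: alternative decomposition).


-- ===== PORT A =====
-- text = text.replace("' ", " ' "); prods = set(text) & set(',.:;"?!');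
-- if not prods: return text; for sign in prods: text = text.replace(sign, ' {} '.format(sign))
-- (the result does not depend on the iteration order over the set `prods`; the port iterates
-- in first-insertion order)
def preprocessFastText (text : String) : String :=
  let t := PySem.Chars.replace text.toList "' ".toList " ' ".toList
  let signs : PySem.Set Char := PySem.Set.ofList [',', '.', ':', ';', '"', '?', '!']
  let prods : PySem.Set Char := PySem.Set.inter (PySem.Set.ofList t) signs
  if prods.isEmpty then String.ofList t
  else String.ofList (prods.foldl (fun s sign => PySem.Chars.replace s [sign] [' ', sign, ' ']) t)

-- ===== PORT B =====
-- one pass: on "' " emit " ' " and skip both chars; on a sign emit ' '+sign+' '; else copy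
def pvPadB (c : Char) : List Char :=
  if [',', '.', ':', ';', '"', '?', '!'].contains c then [' ', c, ' '] else [c]

def pvScanB : List Char → List Char
  | [] => []
  | [c] => pvPadB c
  | c :: c2 :: rest =>
    if c = '\'' ∧ c2 = ' ' then ' ' :: '\'' :: ' ' :: pvScanB rest
    else pvPadB c ++ pvScanB (c2 :: rest)

def preprocessFastText_alt (text : String) : String :=
  String.ofList (pvScanB text.toList)

-- ===== PRECONDITION & SPEC =====
def Spec_preprocessFastText (text : String) (out : String) : Prop := out = preprocessFastText_alt text
instance (text : String) (out : String) : Decidable (Spec_preprocessFastText text out) := by unfold Spec_preprocessFastText; infer_instance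

-- ===== CLAIM (what is proved, stated in full; the proofs are below) =====
def Claim_equal_preprocessFastText : Prop := ∀ (text : String), Dom_preprocessFastText text → Spec_preprocessFastText text (preprocessFastText text)

-- ===== LEMMAS AND PROOFS =====

-- recursive form of text.replace("' ", " ' ") (proof-side helper)
def pvRepQ : List Char → List Char
  | [] => []
  | [c] => [c]
  | c :: c2 :: rest =>
    if c = '\'' ∧ c2 = ' ' then ' ' :: '\'' :: ' ' :: pvRepQ rest
    else c :: pvRepQ (c2 :: rest)

-- character padding by sign membership (proof-side helper)
def pvPadL (c : Char) : List Char :=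
  if c ∈ [',', '.', ':', ';', '"', '?', '!'] then [' ', c, ' '] else [c]

-- replace with the two-char pattern "' " is pvRepQ
theorem pv_go_quote :
    ∀ (fuel : Nat) (l acc : List Char), l.length ≤ fuel →
      PySem.Chars.replace.go "' ".toList " ' ".toList fuel l acc
        = acc.reverse ++ pvRepQ l := by
  intro fuel
  induction fuel with
  | zero =>
    intro l acc h
    have hl : l = [] := by cases l <;> simp_all
    subst hl; simp [PySem.Chars.replace.go, pvRepQ]
  | succ fuel ih =>
    intro l acc h
    match l with
    | [] => simp [PySem.Chars.replace.go, pvRepQ]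
    | [c] =>
      have hp : ("' ".toList.isPrefixOf [c]) = false := by
        simp [List.isPrefixOf]
      simp only [PySem.Chars.replace.go, hp]
      rw [ih [] _ (by simp)]
      simp [pvRepQ]
    | c :: c2 :: rest =>
      by_cases hc : c = '\'' ∧ c2 = ' '
      · obtain ⟨h1, h2⟩ := hc
        subst h1; subst h2
        have hp : ("' ".toList.isPrefixOf ('\'' :: ' ' :: rest)) = true := by
          simp [List.isPrefixOf]
        have hd : List.drop "' ".toList.length ('\'' :: ' ' :: rest) = rest := rfl
        have hstep := ih rest (" ' ".toList.reverse ++ acc) (by simp at h ⊢; omega)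
        simp only [PySem.Chars.replace.go, hp, if_true, hd, hstep]
        simp [pvRepQ]
      · have hp : ("' ".toList.isPrefixOf (c :: c2 :: rest)) = false := by
          simp [List.isPrefixOf]
          intro h1 h2; exact hc ⟨h1.symm, h2.symm⟩
        simp only [PySem.Chars.replace.go, hp]
        rw [ih (c2 :: rest) _ (by simpa using Nat.le_of_succ_le_succ h)]
        simp [pvRepQ, hc]

theorem pv_replace_quote (s : List Char) :
    PySem.Chars.replace s "' ".toList " ' ".toList = pvRepQ s := by
  simpa using pv_go_quote s.length s [] le_rfl

-- B's scan = pad each char of the quote-replaced text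
theorem pv_scan_eq_pad (l : List Char) :
    pvScanB l = (pvRepQ l).flatMap pvPadL := by
  induction l using pvScanB.induct with
  | case1 => simp [pvScanB, pvRepQ]
  | case2 c => simp [pvScanB, pvRepQ, pvPadB, pvPadL]
  | case3 c c2 rest h ih =>
    obtain ⟨h1, h2⟩ := h; subst h1; subst h2
    rw [pvScanB, pvRepQ, if_pos ⟨rfl, rfl⟩, if_pos ⟨rfl, rfl⟩]
    simp [List.flatMap_cons, pvPadL, ih]
  | case4 c c2 rest h ih =>
    rw [pvScanB, pvRepQ, if_neg h, if_neg h]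
    simp [List.flatMap_cons, pvPadB, pvPadL, ih]

-- replace with a single-character pattern is a character-wise flatMap
theorem pv_go_single (o : Char) (new : List Char) :
    ∀ (l : List Char) (fuel : Nat) (acc : List Char), l.length ≤ fuel →
      PySem.Chars.replace.go [o] new fuel l acc
        = acc.reverse ++ l.flatMap (fun c => if c = o then new else [c]) := by
  intro l
  induction l with
  | nil => intro fuel acc h; cases fuel <;> simp [PySem.Chars.replace.go]
  | cons c t ih =>
    intro fuel acc h
    cases fuel with
    | zero => simp at h
    | succ fuel =>
      simp only [PySem.Chars.replace.go]
      by_cases hc : c = o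
      · subst hc
        have hp : [c].isPrefixOf (c :: t) = true := by simp [List.isPrefixOf]
        simp [hp, ih fuel _ (by simpa using h)]
      · have hp : [o].isPrefixOf (c :: t) = false := by
          simp [List.isPrefixOf]; exact fun h' => absurd h'.symm hc
        simp [hp, hc, ih fuel _ (by simpa using h)]

theorem pv_replace_single (o : Char) (new s : List Char) :
    PySem.Chars.replace s [o] new = s.flatMap (fun c => if c = o then new else [c]) := by
  simp [PySem.Chars.replace, pv_go_single o new s s.length [] le_rfl]

theorem pv_flatMap_congr_mem {l : List Char} {f g : Char → List Char}
    (h : ∀ c ∈ l, f c = g c) : l.flatMap f = l.flatMap g := by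
  induction l with
  | nil => rfl
  | cons c t ih =>
    simp only [List.flatMap_cons, h c (by simp),
      ih (fun x hx => h x (by simp [hx]))]

-- A's per-sign replace loop, over a duplicate-free list of non-space signs, is one flatMap
theorem pv_foldl_replace (P : List Char) (hn : P.Nodup) (hs : ∀ c ∈ P, c ≠ ' ') (t : List Char) :
    P.foldl (fun s sign => PySem.Chars.replace s [sign] [' ', sign, ' ']) t
      = t.flatMap (fun c => if c ∈ P then [' ', c, ' '] else [c]) := by
  induction P generalizing t with
  | nil => simp
  | cons s rest ih =>
    rw [List.foldl_cons, ih hn.of_cons (fun c hc => hs c (by simp [hc])),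
      pv_replace_single, List.flatMap_assoc]
    apply pv_flatMap_congr_mem
    intro c _
    by_cases hc : c = s
    · subst hc
      have h1 : (' ' : Char) ∉ rest := fun h => hs ' ' (by simp [h]) rfl
      have h2 : c ∉ rest := (List.nodup_cons.mp hn).1
      simp [h1, h2]
    · simp [hc]

-- ===== VERDICT (by name: the statement is the Claim_ definition above) =====
theorem preprocessFastText_spec : Claim_equal_preprocessFastText := by
  intro text _
  unfold Spec_preprocessFastText preprocessFastText preprocessFastText_alt
  simp only []
  rw [pv_replace_quote]
  set t := pvRepQ text.toList with ht
  set signsL : List Char := [',', '.', ':', ';', '"', '?', '!'] with hsL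
  set signs : PySem.Set Char := PySem.Set.ofList signsL with hsg
  set prods : PySem.Set Char := PySem.Set.inter (PySem.Set.ofList t) signs with hpr
  have hmem : ∀ c, c ∈ prods ↔ c ∈ t ∧ c ∈ signsL := by
    intro c
    simp [hpr, PySem.Set.inter, hsg, PySem.Set.mem_ofList, List.mem_filter]
  have hB : pvScanB text.toList = t.flatMap pvPadL := by
    rw [pv_scan_eq_pad, ht]
  by_cases he : prods.isEmpty
  · simp only [he, if_pos]
    rw [hB]
    have : t.flatMap pvPadL = t := by
      rw [pv_flatMap_congr_mem (g := fun c => [c]) ?_, List.flatMap_singleton']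
      intro c hc
      have hnp : c ∉ prods := by simp [List.isEmpty_iff.mp he]
      have hns : c ∉ [',', '.', ':', ';', '"', '?', '!'] :=
        fun h => hnp ((hmem c).mpr ⟨hc, by rw [hsL]; exact h⟩)
      simp [pvPadL, hns]
    rw [this]
  · simp only [he, if_neg, Bool.false_eq_true, not_false_eq_true]
    rw [hB]
    have hn : prods.Nodup := List.Nodup.filter _ (PySem.Set.nodup_ofList t)
    have hspace : ∀ c ∈ prods, c ≠ ' ' := by
      intro c hc h
      subst h
      have := ((hmem ' ').mp hc).2
      rw [hsL] at this
      exact absurd this (by decide)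
    rw [pv_foldl_replace prods hn hspace t]
    congr 1
    apply pv_flatMap_congr_mem
    intro c hc
    have : c ∈ prods ↔ c ∈ signsL := by rw [hmem]; exact ⟨fun h => h.2, fun h => ⟨hc, h⟩⟩
    simp [pvPadL, this, hsL]
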